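-- pv_equiv track=rewrite | github.com/Wolfram178/vaptor | core/smart_scan.py | decide_scans
-- ===== SOURCE A (Python) =====
-- def decide_scans(open_ports):
--     actions = {
--         "http": False,
--         "ftp": False,
--         "ssh": False,
--         "smb": False,
--     }
--
--     for port in open_ports:
--         if port in [80, 8080, 8000]:
--             actions["http"] = True
--         elif port == 21:
--             actions["ftp"] = True
--         elif port == 22:
--             actions["ssh"] = True
--         elif port == 445:
--             actions["smb"] = True
--
--     return actions
-- ===== SOURCE B (Python) =====
-- def decide_scans(open_ports):
--     table = {
--         "http": [80, 8080, 8000],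
--         "ftp": [21],
--         "ssh": [22],
--         "smb": [445],
--     }
--     ports = list(open_ports)
--     return {svc: any(p in ports for p in group) for svc, group in table.items()}
-- ===== Notes on version B (the rewrite author's own statement) =====
-- stated objective: simpler
-- what changed: Inverted the traversal: instead of scanning the ports and dispatching each through an if/elif chain that mutates flags, B holds a service->trigger-ports table and builds the result in one dict comprehension with an any-membership test per service.
import Mathlib
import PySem

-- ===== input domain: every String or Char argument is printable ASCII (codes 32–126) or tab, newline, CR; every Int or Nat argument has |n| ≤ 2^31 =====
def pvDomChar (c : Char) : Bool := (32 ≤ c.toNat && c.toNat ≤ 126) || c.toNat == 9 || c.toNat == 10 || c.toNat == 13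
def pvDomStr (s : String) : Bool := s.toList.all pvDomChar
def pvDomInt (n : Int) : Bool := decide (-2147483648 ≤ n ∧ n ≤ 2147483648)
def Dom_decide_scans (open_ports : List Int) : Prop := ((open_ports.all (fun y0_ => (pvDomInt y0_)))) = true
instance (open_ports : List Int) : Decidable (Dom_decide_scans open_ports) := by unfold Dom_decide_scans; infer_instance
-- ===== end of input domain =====

-- B inverts the traversal: a service -> trigger-ports table mapped through an any-membership
-- test over the input, instead of A's scan of the ports with an if/elif flag-setting chain
-- (objective: simpler; same asymptotic cost).


-- ===== PORT A =====
-- loop body of A's 'for port in open_ports' (branches in A's order)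
def scanStep (actions : PySem.Dict String Bool) (port : Int) : PySem.Dict String Bool :=
  if ([(80 : Int), 8080, 8000].contains port) then actions.insert "http" true
  else if port == 21 then actions.insert "ftp" true
  else if port == 22 then actions.insert "ssh" true
  else if port == 445 then actions.insert "smb" true
  else actions

def decide_scans (open_ports : List Int) : List (String × Bool) :=
  (open_ports.foldl scanStep
    (PySem.Dict.ofList [("http", false), ("ftp", false), ("ssh", false), ("smb", false)])).items

-- ===== PORT B =====
def decide_scans_alt (open_ports : List Int) : List (String × Bool) :=
  let table : List (String × List Int) :=
    [("http", [80, 8080, 8000]), ("ftp", [21]), ("ssh", [22]), ("smb", [445])]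
  let ports := open_ports
  table.map (fun sg => (sg.1, sg.2.any (fun p => ports.contains p)))

-- ===== PRECONDITION & SPEC =====
def Spec_decide_scans (open_ports : List Int) (out : List (String × Bool)) : Prop := out = decide_scans_alt open_ports
instance (open_ports : List Int) (out : List (String × Bool)) : Decidable (Spec_decide_scans open_ports out) := by unfold Spec_decide_scans; infer_instance

-- ===== CLAIM (what is proved, stated in full; the proofs are below) =====
def Claim_equal_decide_scans : Prop := ∀ (open_ports : List Int), Dom_decide_scans open_ports → Spec_decide_scans open_ports (decide_scans open_ports)

-- ===== LEMMAS AND PROOFS =====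

-- Invariant of A's loop: starting from the four flags h f s m, the fold over l leaves
-- each flag OR-ed with the presence of its trigger ports in l.
theorem scan_loop (l : List Int) (h f s m : Bool) :
    (l.foldl scanStep (PySem.Dict.mk [("http", h), ("ftp", f), ("ssh", s), ("smb", m)])).items =
    [("http", h || l.contains 80 || l.contains 8080 || l.contains 8000),
     ("ftp", f || l.contains 21),
     ("ssh", s || l.contains 22),
     ("smb", m || l.contains 445)] := by
  induction l generalizing h f s m with
  | nil => simp
  | cons a t ih =>
    simp only [List.foldl_cons, scanStep]
    by_cases h1 : a = 80 ∨ a = 8080 ∨ a = 8000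
    · have hc : ([(80 : Int), 8080, 8000].contains a) = true := by
        simp only [List.contains_cons, List.contains_nil, Bool.or_eq_true, beq_iff_eq]
        tauto
      rw [hc, if_pos rfl]
      have hins : (PySem.Dict.mk [("http", h), ("ftp", f), ("ssh", s), ("smb", m)]).insert "http" true
           = PySem.Dict.mk [("http", true), ("ftp", f), ("ssh", s), ("smb", m)] := by rfl
      rw [hins, ih]
      rcases h1 with h1 | h1 | h1 <;> subst h1 <;> simp [List.contains_cons]
    · have n1 : a ≠ 80 := fun he => h1 (Or.inl he)
      have n2 : a ≠ 8080 := fun he => h1 (Or.inr (Or.inl he))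
      have n3 : a ≠ 8000 := fun he => h1 (Or.inr (Or.inr he))
      have e1 : ((80 : Int) == a) = false := beq_eq_false_iff_ne.mpr (Ne.symm n1)
      have e1' : (a == (80 : Int)) = false := beq_eq_false_iff_ne.mpr n1
      have e2 : ((8080 : Int) == a) = false := beq_eq_false_iff_ne.mpr (Ne.symm n2)
      have e2' : (a == (8080 : Int)) = false := beq_eq_false_iff_ne.mpr n2
      have e3 : ((8000 : Int) == a) = false := beq_eq_false_iff_ne.mpr (Ne.symm n3)
      have e3' : (a == (8000 : Int)) = false := beq_eq_false_iff_ne.mpr n3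
      have hc : ([(80 : Int), 8080, 8000].contains a) = false := by
        simp only [List.contains_cons, List.contains_nil, e1, e1', e2, e2', e3, e3',
          Bool.false_or, Bool.or_false, Bool.or_self]
      have hne80 : ((a :: t).contains (80 : Int)) = t.contains 80 := by
        simp only [List.contains_cons, e1, e1', Bool.false_or]
      have hne8080 : ((a :: t).contains (8080 : Int)) = t.contains 8080 := by
        simp only [List.contains_cons, e2, e2', Bool.false_or]
      have hne8000 : ((a :: t).contains (8000 : Int)) = t.contains 8000 := by
        simp only [List.contains_cons, e3, e3', Bool.false_or]
      rw [hc, if_neg Bool.false_ne_true]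
      by_cases h21 : a = 21
      · subst h21
        rw [if_pos (show ((21 : Int) == 21) = true from rfl)]
        have hins : (PySem.Dict.mk [("http", h), ("ftp", f), ("ssh", s), ("smb", m)]).insert "ftp" true
             = PySem.Dict.mk [("http", h), ("ftp", true), ("ssh", s), ("smb", m)] := by rfl
        rw [hins, ih]
        simp [hne80, hne8080, hne8000, List.contains_cons]
      · rw [if_neg (by simpa using h21)]
        have hne21 : ((a :: t).contains (21 : Int)) = t.contains 21 := by
          simp only [List.contains_cons, beq_eq_false_iff_ne.mpr h21,
            beq_eq_false_iff_ne.mpr (Ne.symm h21), Bool.false_or]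
        by_cases h22 : a = 22
        · subst h22
          rw [if_pos (show ((22 : Int) == 22) = true from rfl)]
          have hins : (PySem.Dict.mk [("http", h), ("ftp", f), ("ssh", s), ("smb", m)]).insert "ssh" true
               = PySem.Dict.mk [("http", h), ("ftp", f), ("ssh", true), ("smb", m)] := by rfl
          rw [hins, ih]
          simp [hne80, hne8080, hne8000, hne21, List.contains_cons]
        · rw [if_neg (by simpa using h22)]
          have hne22 : ((a :: t).contains (22 : Int)) = t.contains 22 := by
            simp only [List.contains_cons, beq_eq_false_iff_ne.mpr h22,
              beq_eq_false_iff_ne.mpr (Ne.symm h22), Bool.false_or]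
          by_cases h445 : a = 445
          · subst h445
            rw [if_pos (show ((445 : Int) == 445) = true from rfl)]
            have hins : (PySem.Dict.mk [("http", h), ("ftp", f), ("ssh", s), ("smb", m)]).insert "smb" true
                 = PySem.Dict.mk [("http", h), ("ftp", f), ("ssh", s), ("smb", true)] := by rfl
            rw [hins, ih]
            simp [hne80, hne8080, hne8000, hne21, hne22, List.contains_cons]
          · rw [if_neg (by simpa using h445), ih]
            have hne445 : ((a :: t).contains (445 : Int)) = t.contains 445 := by
              simp only [List.contains_cons, beq_eq_false_iff_ne.mpr h445,
                beq_eq_false_iff_ne.mpr (Ne.symm h445), Bool.false_or]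
            rw [hne80, hne8080, hne8000, hne21, hne22, hne445]

-- ===== VERDICT (by name: the statement is the Claim_ definition above) =====
theorem decide_scans_spec : Claim_equal_decide_scans := by
  intro l _
  unfold Spec_decide_scans decide_scans decide_scans_alt
  have hofList : PySem.Dict.ofList [("http", false), ("ftp", false), ("ssh", false), ("smb", false)]
      = PySem.Dict.mk [("http", false), ("ftp", false), ("ssh", false), ("smb", false)] := by rfl
  rw [hofList, scan_loop]
  simp [List.any_cons, Bool.or_assoc]
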